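-- pv_equiv track=rewrite | github.com/tucker-moore/aoc22 | 10/main.py | x_samples
-- ===== SOURCE A (Python) =====
-- def x_samples(instructions):
--     clock = 0
--     x = 1
--     samples = [(0,x)]
--     for insn in instructions:
--         match insn[0]:
--             case 'addx':
--                 clock += 2
--                 x += int(insn[1])
--                 samples.append((clock+1,x))
--             case 'noop':
--                 clock += 1
--     return samples
-- ===== SOURCE B (Python) =====
-- def x_samples(instructions):
--     costs = [2 if insn[0] == 'addx' else 1 if insn[0] == 'noop' else 0
--              for insn in instructions]
--     deltas = [int(insn[1]) if insn[0] == 'addx' else 0 for insn in instructions]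
--     n = len(instructions)
--     clocks = [0] * n
--     xs = [0] * n
--     c, v = 0, 1
--     for k in range(n):
--         c += costs[k]
--         v += deltas[k]
--         clocks[k] = c
--         xs[k] = v
--     return [(0, 1)] + [(clocks[k] + 1, xs[k]) for k in range(n)
--                        if instructions[k][0] == 'addx']
-- ===== Notes on version B (the rewrite author's own statement) =====
-- stated objective: alternative
-- what changed: Replaces A's single stateful scan that appends samples as it goes with a build-tables-then-filter decomposition: per-instruction (cost, delta) tables, two prefix-sum arrays for the running clock and register, then a separate filter pass emitting a sample for each addx.
import Mathlib
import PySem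

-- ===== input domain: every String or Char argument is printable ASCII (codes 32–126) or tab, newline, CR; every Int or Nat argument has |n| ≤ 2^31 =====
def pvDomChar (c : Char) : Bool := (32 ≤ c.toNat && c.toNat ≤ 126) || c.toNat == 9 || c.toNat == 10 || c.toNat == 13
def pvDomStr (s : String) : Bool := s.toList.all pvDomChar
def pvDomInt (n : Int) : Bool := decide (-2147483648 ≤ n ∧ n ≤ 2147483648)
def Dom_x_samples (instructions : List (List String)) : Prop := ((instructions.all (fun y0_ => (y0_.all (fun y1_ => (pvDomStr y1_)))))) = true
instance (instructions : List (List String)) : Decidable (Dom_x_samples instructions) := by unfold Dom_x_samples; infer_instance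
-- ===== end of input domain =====

-- B replaces A's single stateful scan (appending samples as it goes) with a
-- build-tables-then-filter decomposition: per-instruction (cost, delta) tables,
-- a prefix-sum pass, then a filter pass emitting one sample per 'addx'
-- (objective: alternative; same O(n) cost).

-- ===== PORT A =====
-- insn[0] / int(insn[1]) ported via PySem.List.pyGet? / PySem.Int.ofStr?;
-- Pre_ guarantees they are `some`, so the `.getD` defaults are never used.
def pvHeadA (insn : List String) : String := (PySem.List.pyGet? insn 0).getD ""

def pvDeltaA (insn : List String) : Int :=
  ((PySem.List.pyGet? insn 1).bind PySem.Int.ofStr?).getD 0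

def pvStepA (s : Int × Int × List (Int × Int)) (insn : List String) :
    Int × Int × List (Int × Int) :=
  if pvHeadA insn = "addx" then
    (s.1 + 2, s.2.1 + pvDeltaA insn, s.2.2 ++ [(s.1 + 2 + 1, s.2.1 + pvDeltaA insn)])
  else if pvHeadA insn = "noop" then
    (s.1 + 1, s.2.1, s.2.2)
  else s

def x_samples (instructions : List (List String)) : List (Int × Int) :=
  (instructions.foldl pvStepA (0, 1, [(0, 1)])).2.2

-- ===== PORT B =====
def pvHeadB (insn : List String) : String := (PySem.List.pyGet? insn 0).getD ""

def pvCostB (insn : List String) : Int :=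
  if pvHeadB insn = "addx" then 2 else if pvHeadB insn = "noop" then 1 else 0

def pvDeltaB (insn : List String) : Int :=
  if pvHeadB insn = "addx" then ((PySem.List.pyGet? insn 1).bind PySem.Int.ofStr?).getD 0
  else 0

-- the prefix-sum loop of Source B, producing (running clock, running x) per instruction
def pvScan2 : Int → Int → List (Int × Int) → List (Int × Int)
  | _, _, [] => []
  | c, v, (a, d) :: rest => (c + a, v + d) :: pvScan2 (c + a) (v + d) rest

def x_samples_alt (instructions : List (List String)) : List (Int × Int) :=
  let table := pvScan2 0 1 ((instructions.map pvCostB).zip (instructions.map pvDeltaB))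
  (0, 1) :: (instructions.zip table).filterMap
      (fun p => if pvHeadB p.1 = "addx" then some (p.2.1 + 1, p.2.2) else none)

-- ===== PRECONDITION & SPEC =====
-- Pre_ excludes exactly the inputs where Python A raises: an empty instruction
-- (IndexError on insn[0]) or an 'addx' without a second int-parseable token
-- (IndexError / ValueError).
def Pre_x_samples (instructions : List (List String)) : Prop :=
  ∀ insn ∈ instructions, insn ≠ [] ∧
    (pvHeadA insn = "addx" → ((PySem.List.pyGet? insn 1).bind PySem.Int.ofStr?).isSome = true)
instance (instructions : List (List String)) : Decidable (Pre_x_samples instructions) := by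
  unfold Pre_x_samples; infer_instance

def pvWitness_x_samples : List (List String) := [["addx", "3"], ["noop"], ["addx", "-5"]]

def Spec_x_samples (instructions : List (List String)) (out : List (Int × Int)) : Prop := out = x_samples_alt instructions
instance (instructions : List (List String)) (out : List (Int × Int)) : Decidable (Spec_x_samples instructions out) := by unfold Spec_x_samples; infer_instance

-- ===== CLAIM (what is proved, stated in full; the proofs are below) =====
def Claim_equal_x_samples : Prop := ∀ (instructions : List (List String)), Dom_x_samples instructions → Pre_x_samples instructions → Spec_x_samples instructions (x_samples instructions)

-- ===== LEMMAS AND PROOFS =====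
theorem pvHeadB_eq (insn : List String) : pvHeadB insn = pvHeadA insn := rfl

theorem pvLoop_eq (l : List (List String)) : ∀ (c v : Int) (samples : List (Int × Int)),
    (l.foldl pvStepA (c, v, samples)).2.2
      = samples ++ (l.zip (pvScan2 c v ((l.map pvCostB).zip (l.map pvDeltaB)))).filterMap
          (fun p => if pvHeadB p.1 = "addx" then some (p.2.1 + 1, p.2.2) else none) := by
  induction l with
  | nil => intro c v samples; simp [pvScan2]
  | cons insn rest ih =>
    intro c v samples
    by_cases h1 : pvHeadA insn = "addx"
    · simp [pvStepA, pvScan2, pvCostB, pvDeltaA, pvDeltaB, pvHeadB_eq, h1, ih]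
    · by_cases h2 : pvHeadA insn = "noop"
      · simp [pvStepA, pvScan2, pvCostB, pvDeltaB, pvHeadB_eq, h1, h2, ih]
      · simp [pvStepA, pvScan2, pvCostB, pvDeltaB, pvHeadB_eq, h1, h2, ih]

-- ===== VERDICT (by name: the statement is the Claim_ definition above) =====
theorem x_samples_spec : Claim_equal_x_samples := by
  intro instructions _ _
  unfold Spec_x_samples x_samples x_samples_alt
  simp [pvLoop_eq]
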